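-- pv_equiv track=rewrite | github.com/pam1001/tfm_Paula_Twitter | categoriza.py | categoriza
-- ===== SOURCE A (Python) =====
-- def categoriza(ls_tw, listas):
--   res = []
--   for ls in listas:
--       aux = []
--       for tw in ls_tw:
--           if any(w in tw.split(' ') for w in ls):
--               aux.append(1)
--           else:
--               aux.append(0)
--       res.append(aux)
--   return res
-- ===== SOURCE B (Python) =====
-- def categoriza(ls_tw, listas):
--     # Inverted index: keyword -> set of list-indices containing it; then one pass over tweets.
--     index = {}
--     for i, ls in enumerate(listas):
--         for w in ls:
--             index.setdefault(w, set()).add(i)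
--
--     def hits(tw):
--         h = set()
--         for w in set(tw.split(' ')):
--             h |= index.get(w, set())
--         return h
--
--     cols = [hits(tw) for tw in ls_tw]
--     return [[1 if i in col else 0 for col in cols] for i in range(len(listas))]
-- ===== Notes on version B (the rewrite author's own statement) =====
-- stated objective: faster
-- what changed: B inverts the loop nest: it builds an inverted index (keyword -> set of list-indices) once over listas, then makes a single pass over the tweets unioning index hits per tweet word, and finally assembles the 0/1 matrix from those hit sets, instead of A's triple loop re-splitting each tweet and scanning every keyword of every list per cell.
import Mathlib
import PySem

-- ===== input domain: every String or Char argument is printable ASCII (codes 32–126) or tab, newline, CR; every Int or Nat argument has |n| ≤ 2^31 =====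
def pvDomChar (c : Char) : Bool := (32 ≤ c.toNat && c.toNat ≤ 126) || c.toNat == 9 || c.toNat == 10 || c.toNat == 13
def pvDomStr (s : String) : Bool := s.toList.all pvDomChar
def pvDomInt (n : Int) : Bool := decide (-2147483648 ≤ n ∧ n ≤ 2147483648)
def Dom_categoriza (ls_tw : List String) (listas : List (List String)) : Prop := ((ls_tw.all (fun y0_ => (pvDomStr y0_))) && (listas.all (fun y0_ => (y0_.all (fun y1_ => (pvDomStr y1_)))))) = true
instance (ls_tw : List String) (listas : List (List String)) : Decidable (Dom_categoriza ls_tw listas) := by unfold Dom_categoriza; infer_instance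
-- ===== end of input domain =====

-- B inverts the loop nest: it builds an inverted index (keyword -> set of list-indices) once,
-- then one pass over the tweets collects the hit indices per tweet, and the 0/1 matrix is
-- assembled from those hit sets (objective: faster).

-- tw.split(' ') — sep " " is nonempty so split? never returns none; shared by both ports
def pySplitSpace (tw : String) : List String := (PySem.Str.split? tw " ").getD []

-- ===== PORT A =====
def categoriza (ls_tw : List String) (listas : List (List String)) : List (List Int) :=
  listas.foldl (fun res ls =>
    res ++ [ls_tw.foldl (fun aux tw =>
      aux ++ [if ls.any (fun w => (pySplitSpace tw).contains w) then (1 : Int) else 0]) []]) []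

-- ===== PORT B =====
-- index = {}; for i, ls in enumerate(listas): for w in ls: index.setdefault(w, set()).add(i)
def pvIndex (listas : List (List String)) : PySem.Dict String (PySem.Set Int) :=
  (PySem.List.enumerate listas 0).foldl
    (fun d p => p.2.foldl
      (fun d w => PySem.Dict.modify d w (PySem.Set.ofList []) (fun s => PySem.Set.add s p.1)) d)
    PySem.Dict.empty

-- hits(tw): h = set(); for w in set(tw.split(' ')): h |= index.get(w, set()); return h
-- (h is consumed only through membership, which does not depend on Python's set iteration order)
def pvHits (idx : PySem.Dict String (PySem.Set Int)) (tw : String) : PySem.Set Int :=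
  (PySem.Set.ofList (pySplitSpace tw)).foldl
    (fun h w => PySem.Set.union h (PySem.Dict.getD idx w (PySem.Set.ofList []))) (PySem.Set.ofList [])

def categoriza_alt (ls_tw : List String) (listas : List (List String)) : List (List Int) :=
  let idx := pvIndex listas
  let cols := ls_tw.map (fun tw => pvHits idx tw)
  (PySem.List.pyRange 0 (listas.length : Int) 1).map
    (fun i => cols.map (fun col => if PySem.Set.contains col i then (1 : Int) else 0))

-- ===== PRECONDITION & SPEC =====
def Spec_categoriza (ls_tw : List String) (listas : List (List String)) (out : List (List Int)) : Prop := out = categoriza_alt ls_tw listas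
instance (ls_tw : List String) (listas : List (List String)) (out : List (List Int)) : Decidable (Spec_categoriza ls_tw listas out) := by unfold Spec_categoriza; infer_instance

-- ===== CLAIM (what is proved, stated in full; the proofs are below) =====
def Claim_equal_categoriza : Prop := ∀ (ls_tw : List String) (listas : List (List String)), Dom_categoriza ls_tw listas → Spec_categoriza ls_tw listas (categoriza ls_tw listas)

-- ===== LEMMAS AND PROOFS =====

-- the inner keyword loop of the index build: i gets recorded under w iff w is a keyword of the current list
theorem mem_getD_inner (ls : List String) (d : PySem.Dict String (PySem.Set Int)) (j : Int)
    (w : String) (i : Int) :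
    i ∈ PySem.Dict.getD
      (ls.foldl (fun d w => PySem.Dict.modify d w (PySem.Set.ofList []) (fun s => PySem.Set.add s j)) d)
      w (PySem.Set.ofList [])
    ↔ i ∈ PySem.Dict.getD d w (PySem.Set.ofList []) ∨ (w ∈ ls ∧ i = j) := by
  induction ls generalizing d with
  | nil => simp
  | cons x ls ih =>
    simp only [List.foldl_cons, ih, PySem.Dict.getD_modify, List.mem_cons]
    by_cases hwx : w = x
    · subst hwx; simp only [if_true, PySem.Set.mem_add]; tauto
    · rw [if_neg hwx]; tauto

-- the index build over enumerate listas s: i recorded under w iff some list listas[k] contains w, i = s + k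
theorem mem_getD_pvIndex_gen (listas : List (List String)) (s : Int)
    (d : PySem.Dict String (PySem.Set Int)) (w : String) (i : Int) :
    i ∈ PySem.Dict.getD
      ((PySem.List.enumerate listas s).foldl
        (fun d p => p.2.foldl
          (fun d w => PySem.Dict.modify d w (PySem.Set.ofList []) (fun s => PySem.Set.add s p.1)) d) d)
      w (PySem.Set.ofList [])
    ↔ i ∈ PySem.Dict.getD d w (PySem.Set.ofList [])
      ∨ ∃ (k : Nat), ∃ (h : k < listas.length), i = s + k ∧ w ∈ listas[k] := by
  induction listas generalizing s d with
  | nil => simp [PySem.List.enumerate]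
  | cons x xs ih =>
    rw [PySem.List.enumerate_cons]
    simp only [List.foldl_cons, ih, mem_getD_inner]
    constructor
    · rintro (((h | ⟨hw, hi⟩) | ⟨k, hk, hi, hw⟩))
      · exact Or.inl h
      · exact Or.inr ⟨0, by simp, by simpa using hi, by simpa using hw⟩
      · exact Or.inr ⟨k+1, by simpa using hk, by push_cast; omega, by simpa using hw⟩
    · rintro (h | ⟨k, hk, hi, hw⟩)
      · exact Or.inl (Or.inl h)
      · cases k with
        | zero => exact Or.inl (Or.inr ⟨by simpa using hw, by simpa using hi⟩)
        | succ k => exact Or.inr ⟨k, by simpa using hk, by push_cast at hi ⊢; omega, by simpa using hw⟩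

theorem mem_getD_pvIndex (listas : List (List String)) (w : String) (i : Int) :
    i ∈ PySem.Dict.getD (pvIndex listas) w (PySem.Set.ofList []) ↔
    ∃ (k : Nat), ∃ (h : k < listas.length), i = (k : Int) ∧ w ∈ listas[k] := by
  unfold pvIndex
  rw [mem_getD_pvIndex_gen]
  simp [PySem.Dict.getD_empty]

theorem mem_foldl_union (ws : List String) (g : String → PySem.Set Int)
    (h0 : PySem.Set Int) (hn : h0.Nodup) (i : Int) :
    i ∈ ws.foldl (fun h w => PySem.Set.union h (g w)) h0 ↔ i ∈ h0 ∨ ∃ w ∈ ws, i ∈ g w := by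
  induction ws generalizing h0 with
  | nil => simp
  | cons x ws ih =>
    simp only [List.foldl_cons]
    rw [ih _ (PySem.Set.nodup_union _ _ hn)]
    rw [PySem.Set.mem_union]
    simp only [List.mem_cons]
    aesop

theorem mem_pvHits (idx : PySem.Dict String (PySem.Set Int)) (tw : String) (i : Int) :
    i ∈ pvHits idx tw ↔ ∃ w ∈ pySplitSpace tw, i ∈ PySem.Dict.getD idx w (PySem.Set.ofList []) := by
  unfold pvHits
  rw [mem_foldl_union _ _ _ (by simp [PySem.Set.ofList_nil])]
  simp only [PySem.Set.ofList_nil, List.not_mem_nil, false_or]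
  constructor
  · rintro ⟨w, hw, hi⟩; exact ⟨w, (PySem.Set.mem_ofList _ _).mp hw, hi⟩
  · rintro ⟨w, hw, hi⟩; exact ⟨w, (PySem.Set.mem_ofList _ _).mpr hw, hi⟩

-- cell equality: tweet tw hits list index j in B's hit set iff A's any-keyword test fires
theorem contains_pvHits_eq (listas : List (List String)) (tw : String) (j : Nat)
    (hj : j < listas.length) :
    PySem.Set.contains (pvHits (pvIndex listas) tw) (j : Int)
      = listas[j].any (fun w => (pySplitSpace tw).contains w) := by
  have hiff : ((j : Int) ∈ pvHits (pvIndex listas) tw) ↔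
      (listas[j].any (fun w => (pySplitSpace tw).contains w) = true) := by
    rw [mem_pvHits]
    constructor
    · rintro ⟨w, hw, hm⟩
      rw [mem_getD_pvIndex] at hm
      obtain ⟨k, hk, hjk, hwk⟩ := hm
      have : k = j := by exact_mod_cast hjk.symm
      subst this
      simp only [List.any_eq_true]
      exact ⟨w, hwk, by simpa using hw⟩
    · intro h
      simp only [List.any_eq_true] at h
      obtain ⟨w, hw, hc⟩ := h
      exact ⟨w, by simpa using hc, (mem_getD_pvIndex listas w _).mpr ⟨j, hj, rfl, hw⟩⟩
  cases hb : listas[j].any (fun w => (pySplitSpace tw).contains w) with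
  | true => exact (PySem.Set.contains_iff _ _).mpr (hiff.mpr hb)
  | false =>
    cases hc : PySem.Set.contains (pvHits (pvIndex listas) tw) (j : Int) with
    | false => rfl
    | true => rw [← hb, ← hiff.mp ((PySem.Set.contains_iff _ _).mp hc)]

-- ===== VERDICT (by name: the statement is the Claim_ definition above) =====
theorem categoriza_spec : Claim_equal_categoriza := by
  intro ls_tw listas _
  unfold Spec_categoriza categoriza categoriza_alt
  rw [PySem.List.foldl_append_singleton_eq_map, PySem.List.pyRange_zero_natCast, List.map_map]
  simp only [List.nil_append, List.map_map]
  apply List.ext_getElem (by simp)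
  intro j h1 h2
  simp only [List.getElem_map, List.getElem_range, Function.comp_apply]
  rw [PySem.List.foldl_append_singleton_eq_map, List.nil_append]
  refine List.map_congr_left ?_
  intro tw _
  simp only [Function.comp_apply]
  rw [contains_pvHits_eq listas tw j (by simpa using h1)]
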